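-- pv_equiv track=rewrite | github.com/elixir-cloud-aai/tesk-core | tesk_core/filer.py | subfolders_in
-- ===== SOURCE A (Python) =====
-- def subfolders_in(whole_path):
--     """
--     Returns all subfolders in a path, in order
--
--     >>> subfolders_in('/')
--     ['/']
--
--     >>> subfolders_in('/this/is/a/path')
--     ['/this', '/this/is', '/this/is/a', '/this/is/a/path']
--
--     >>> subfolders_in('this/is/a/path')
--     ['this', 'this/is', 'this/is/a', 'this/is/a/path']
--     """
--     path_fragments = whole_path.lstrip('/').split('/')
--     if whole_path.startswith('/'):
--         path_fragments[0] = '/' + path_fragments[0]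
--     path = path_fragments[0]
--     subfolders = [path]
--     for fragment in path_fragments[1:]:
--         path += '/' + fragment
--         subfolders.append(path)
--     return subfolders
-- ===== SOURCE B (Python) =====
-- def subfolders_in(whole_path):
--     fragments = whole_path.lstrip('/').split('/')
--     if whole_path.startswith('/'):
--         fragments[0] = '/' + fragments[0]
--     return ['/'.join(fragments[:i + 1]) for i in range(len(fragments))]
-- ===== Notes on version B (the rewrite author's own statement) =====
-- stated objective: alternative
-- what changed: Instead of carrying a running path string and appending to an accumulator list, B produces each element independently by re-joining the i+1-fragment prefix slice of the fragment list.
import Mathlib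
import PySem

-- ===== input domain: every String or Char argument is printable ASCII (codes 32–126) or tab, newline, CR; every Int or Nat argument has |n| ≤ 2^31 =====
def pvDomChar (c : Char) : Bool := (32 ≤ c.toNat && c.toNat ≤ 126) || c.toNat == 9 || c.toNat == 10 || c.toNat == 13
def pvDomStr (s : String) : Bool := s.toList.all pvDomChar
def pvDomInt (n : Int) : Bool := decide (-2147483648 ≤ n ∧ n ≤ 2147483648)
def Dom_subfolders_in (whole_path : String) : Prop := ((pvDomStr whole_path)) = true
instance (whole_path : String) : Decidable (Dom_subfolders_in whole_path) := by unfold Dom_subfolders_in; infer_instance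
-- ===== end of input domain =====

-- B re-derives each subfolder by re-joining the corresponding fragment-prefix slice instead of
-- extending a carried path string into an accumulator list (objective: alternative decomposition).

-- ===== PORT A =====
def subfolders_in (whole_path : String) : List String :=
  -- whole_path.lstrip('/') : dropping leading '/' characters is exact for a single strip char
  let path_fragments := PySem.Chars.splitOn (whole_path.toList.dropWhile (· == '/')) ['/']
  let path_fragments :=
    if PySem.Str.startswith whole_path "/" then
      match path_fragments with
      | f0 :: rest => ('/' :: f0) :: rest   -- path_fragments[0] = '/' + path_fragments[0]
      | [] => []                            -- unreachable: splitOn with a nonempty sep yields ≥ 1 piece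
    else path_fragments
  match path_fragments with
  | [] => []                                -- unreachable (as above)
  | f0 :: rest =>                           -- path = path_fragments[0]; subfolders = [path]; for fragment in path_fragments[1:] …
    ((rest.foldl (fun (st : List (List Char) × List Char) fragment =>
        let path := st.2 ++ '/' :: fragment
        (st.1 ++ [path], path)) ([f0], f0)).1).map String.mk

-- ===== PORT B =====
def subfolders_in_alt (whole_path : String) : List String :=
  -- same fragment computation as Source B's first three lines (byte-identical Python)
  let fragments := PySem.Chars.splitOn (whole_path.toList.dropWhile (· == '/')) ['/']
  let fragments :=
    if PySem.Str.startswith whole_path "/" then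
      match fragments with
      | f0 :: rest => ('/' :: f0) :: rest
      | [] => []
    else fragments
  -- ['/'.join(fragments[:i+1]) for i in range(len(fragments))]; fragments[:i+1] with i+1 ≥ 0 is take (i+1)
  (List.range fragments.length).map
    (fun i => String.mk (PySem.Chars.join ['/'] (fragments.take (i + 1))))

-- ===== PRECONDITION & SPEC =====
def Spec_subfolders_in (whole_path : String) (out : List String) : Prop := out = subfolders_in_alt whole_path
instance (whole_path : String) (out : List String) : Decidable (Spec_subfolders_in whole_path out) := by unfold Spec_subfolders_in; infer_instance

-- ===== CLAIM (what is proved, stated in full; the proofs are below) =====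
def Claim_equal_subfolders_in : Prop := ∀ (whole_path : String), Dom_subfolders_in whole_path → Spec_subfolders_in whole_path (subfolders_in whole_path)

-- ===== LEMMAS AND PROOFS =====

/-- The list of cumulative paths A's loop produces, as a structural recursion. -/
def pvChain (p : List Char) (rest : List (List Char)) : List (List Char) :=
  match rest with
  | [] => [p]
  | f :: fs => p :: pvChain (p ++ '/' :: f) fs

theorem pvFoldA (rest : List (List Char)) (acc : List (List Char)) (p : List Char) :
    ((rest.foldl (fun (st : List (List Char) × List Char) fragment =>
        let path := st.2 ++ '/' :: fragment
        (st.1 ++ [path], path)) (acc ++ [p], p)).1) = acc ++ pvChain p rest := by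
  induction rest generalizing acc p with
  | nil => simp [pvChain]
  | cons f fs ih =>
    simp only [List.foldl_cons, pvChain]
    have := ih (acc ++ [p]) (p ++ '/' :: f)
    simpa using this

theorem pvJoinShift (a b : List Char) (l : List (List Char)) :
    PySem.Chars.join ['/'] ((a ++ '/' :: b) :: l) = PySem.Chars.join ['/'] (a :: b :: l) := by
  cases l with
  | nil => simp [PySem.Chars.join_singleton, PySem.Chars.join_cons_cons]
  | cons c l' => simp [PySem.Chars.join_cons_cons]

theorem pvPrefixJoin (rest : List (List Char)) (p : List Char) :
    (List.range (rest.length + 1)).map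
        (fun i => PySem.Chars.join ['/'] ((p :: rest).take (i + 1))) = pvChain p rest := by
  induction rest generalizing p with
  | nil => simp [pvChain, PySem.Chars.join_singleton]
  | cons f fs ih =>
    rw [List.range_succ_eq_map]
    simp only [List.map_cons, List.map_map, pvChain]
    congr 1
    · simp [PySem.Chars.join_singleton]
    · rw [← ih (p ++ '/' :: f)]
      simp only [List.length_cons]
      apply List.map_congr_left
      intro i _
      simp only [Function.comp_apply, Nat.succ_eq_add_one, List.take_succ_cons]
      exact (pvJoinShift p f (fs.take i)).symm

theorem pvMain (frags : List (List Char)) :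
    (match frags with
     | [] => ([] : List String)
     | f0 :: rest =>
       ((rest.foldl (fun (st : List (List Char) × List Char) fragment =>
           let path := st.2 ++ '/' :: fragment
           (st.1 ++ [path], path)) ([f0], f0)).1).map String.mk)
    = (List.range frags.length).map
        (fun i => String.mk (PySem.Chars.join ['/'] (frags.take (i + 1)))) := by
  cases frags with
  | nil => simp
  | cons f0 rest =>
    refine (congrArg (List.map String.mk) (pvFoldA rest [] f0)).trans ?_
    rw [List.nil_append, List.length_cons, ← pvPrefixJoin rest f0, List.map_map]
    rfl

-- ===== VERDICT (by name: the statement is the Claim_ definition above) =====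
theorem subfolders_in_spec : Claim_equal_subfolders_in := by
  intro whole_path _
  unfold Spec_subfolders_in subfolders_in subfolders_in_alt
  exact pvMain _
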